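-- pv_equiv track=rewrite | github.com/google/distla_core | distla/distla_core/distla_core/blas/cannons/simple_cannons.py | _make_shuffle_pcores
-- ===== SOURCE A (Python) =====
-- import collections
--
-- def _make_shuffle_pcores(n, grid):
--   """
--   Generates a list of integers instructing `pshuffle` to have each processor
--   communicate to nth closes core within its chip.
--   Returns e.g.
--     (1, 0, 3, 2, 5, 4, 7, 6)
--   For n=1, grid=(2, 2, 2).
--   """
--   Ncore, Nrow, Ncol = grid
--
--   shuffle_core = []
--   for j in range(Ncol * Nrow):
--     these_cores = range(j * Ncore, (j + 1) * Ncore)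
--     chip = collections.deque(these_cores)
--     chip.rotate(n)
--     shuffle_core += chip
--   return tuple(shuffle_core)
-- ===== SOURCE B (Python) =====
-- def _make_shuffle_pcores(n, grid):
--   Ncore, Nrow, Ncol = grid
--   return tuple(j * Ncore + (i - n) % Ncore
--                for j in range(Ncol * Nrow) for i in range(Ncore))
-- ===== Notes on version B (the rewrite author's own statement) =====
-- stated objective: simpler
-- what changed: Replaces the per-chip deque construction and rotate() with a single nested comprehension that computes each entry directly by modular arithmetic: j*Ncore + (i - n) % Ncore.
import Mathlib
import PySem

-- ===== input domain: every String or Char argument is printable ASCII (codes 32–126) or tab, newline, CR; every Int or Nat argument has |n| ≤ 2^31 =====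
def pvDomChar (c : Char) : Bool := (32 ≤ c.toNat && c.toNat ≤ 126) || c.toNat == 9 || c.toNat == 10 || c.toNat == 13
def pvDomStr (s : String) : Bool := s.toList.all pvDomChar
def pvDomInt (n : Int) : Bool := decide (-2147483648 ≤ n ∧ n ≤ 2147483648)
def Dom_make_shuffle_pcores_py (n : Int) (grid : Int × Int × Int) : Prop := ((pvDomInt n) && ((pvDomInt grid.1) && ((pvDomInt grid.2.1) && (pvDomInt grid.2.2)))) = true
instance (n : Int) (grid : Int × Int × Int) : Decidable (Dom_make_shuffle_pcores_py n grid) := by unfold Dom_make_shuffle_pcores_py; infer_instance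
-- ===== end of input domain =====

-- B replaces A's per-chip deque rotation with a direct modular-index formula in one
-- nested comprehension (objective: simpler).

-- ===== PORT A =====
-- collections.deque.rotate(n): new[i] = old[(i - n) mod len]; exact rendering of the
-- deque rotation (PySem has no deque): the rotated deque, read left to right, is
-- drop k ++ take k with k = (-n) mod len (Python mod), and rotating an empty deque is a no-op.
def dequeRotate (l : List Int) (n : Int) : List Int :=
  if l.isEmpty then l
  else
    let k := (PySem.Int.mod (-n) (l.length : Int)).toNat
    l.drop k ++ l.take k

def make_shuffle_pcores_py (n : Int) (grid : Int × Int × Int) : List Int :=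
  let Ncore := grid.1
  let Nrow := grid.2.1
  let Ncol := grid.2.2
  (PySem.List.pyRange 0 (Ncol * Nrow) 1).foldl
    (fun acc j => acc ++ dequeRotate (PySem.List.pyRange (j * Ncore) ((j + 1) * Ncore) 1) n) []

-- ===== PORT B =====
def make_shuffle_pcores_py_alt (n : Int) (grid : Int × Int × Int) : List Int :=
  let Ncore := grid.1
  let Nrow := grid.2.1
  let Ncol := grid.2.2
  (PySem.List.pyRange 0 (Ncol * Nrow) 1).flatMap
    (fun j => (PySem.List.pyRange 0 Ncore 1).map
      (fun i => j * Ncore + PySem.Int.mod (i - n) Ncore))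

-- ===== PRECONDITION & SPEC =====
def Spec_make_shuffle_pcores_py (n : Int) (grid : Int × Int × Int) (out : List Int) : Prop := out = make_shuffle_pcores_py_alt n grid
instance (n : Int) (grid : Int × Int × Int) (out : List Int) : Decidable (Spec_make_shuffle_pcores_py n grid out) := by unfold Spec_make_shuffle_pcores_py; infer_instance

-- ===== CLAIM (what is proved, stated in full; the proofs are below) =====
def Claim_equal_make_shuffle_pcores_py : Prop := ∀ (n : Int) (grid : Int × Int × Int), Dom_make_shuffle_pcores_py n grid → Spec_make_shuffle_pcores_py n grid (make_shuffle_pcores_py n grid)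

-- ===== LEMMAS AND PROOFS =====

-- One chip: rotating the block [j*Ncore, (j+1)*Ncore) right by n equals the modular formula.
lemma chip_eq (n Ncore j : Int) :
    dequeRotate (PySem.List.pyRange (j * Ncore) ((j + 1) * Ncore) 1) n
      = (PySem.List.pyRange 0 Ncore 1).map
          (fun i => j * Ncore + PySem.Int.mod (i - n) Ncore) := by
  by_cases hN : Ncore ≤ 0
  · rw [PySem.List.pyRange_one_eq_nil (by nlinarith : (j + 1) * Ncore ≤ j * Ncore),
        PySem.List.pyRange_one_eq_nil hN]
    rfl
  replace hN : 0 < Ncore := by omega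
  set l := PySem.List.pyRange (j * Ncore) ((j + 1) * Ncore) 1 with hl
  have hT : ((j + 1) * Ncore - j * Ncore).toNat = Ncore.toNat := by congr 1; ring
  have hlen : l.length = Ncore.toNat := by
    rw [hl, PySem.List.length_pyRange_one, hT]
  have hlenI : (l.length : Int) = Ncore := by
    rw [hlen]; exact Int.toNat_of_nonneg hN.le
  have hne : l.isEmpty = false := by
    rw [List.isEmpty_eq_false_iff, ← List.length_pos_iff, hlen]
    omega
  set kZ := PySem.Int.mod (-n) Ncore with hkZ
  have hk0 : 0 ≤ kZ := PySem.Int.mod_nonneg _ hN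
  have hklt : kZ < Ncore := PySem.Int.mod_lt _ hN
  have hkNat : (kZ.toNat : Int) = kZ := Int.toNat_of_nonneg hk0
  have hkle : kZ.toNat ≤ l.length := by omega
  have hmod : ∀ i : Nat, PySem.Int.mod ((i : Int) - n) Ncore = ((i : Int) + kZ) % Ncore := by
    intro i
    rw [PySem.Int.mod_eq_emod_of_pos hN, hkZ, PySem.Int.mod_eq_emod_of_pos hN,
        Int.add_emod_emod, sub_eq_add_neg]
  simp only [dequeRotate, hne, if_neg Bool.false_ne_true, hlenI]
  rw [← hkZ]
  apply List.ext_getElem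
  · simp [hlen, PySem.List.length_pyRange_one]
    omega
  · intro i h1 h2
    have hiL : i < Ncore.toNat := by
      simp [hlen] at h1; omega
    rw [List.getElem_map, PySem.List.getElem_pyRange_one]
    simp only [zero_add]
    rw [hmod i]
    by_cases hcase : i < l.length - kZ.toNat
    · rw [List.getElem_append_left (by simp; omega), List.getElem_drop]
      simp only [hl, PySem.List.getElem_pyRange_one]
      have he : ((i : Int) + kZ) % Ncore = (i : Int) + kZ :=
        Int.emod_eq_of_lt (by omega) (by omega)
      rw [he]
      push_cast
      rw [hkNat]
      ring
    · replace hcase : l.length - kZ.toNat ≤ i := by omega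
      rw [List.getElem_append_right (by simp; omega), List.getElem_take]
      simp only [List.length_drop, hl, PySem.List.length_pyRange_one, hT,
        PySem.List.getElem_pyRange_one]
      have hsub : ((i : Int) + kZ) % Ncore = ((i : Int) + kZ - Ncore) % Ncore :=
        (Int.sub_emod_right _ _).symm
      have he : ((i : Int) + kZ - Ncore) % Ncore = (i : Int) + kZ - Ncore :=
        Int.emod_eq_of_lt (by omega) (by omega)
      rw [hsub, he]
      have hcast : ((i - (Ncore.toNat - kZ.toNat) : Nat) : Int) = (i : Int) + kZ - Ncore := by
        have h5 := hlen
        omega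
      rw [hcast]

-- ===== VERDICT (by name: the statement is the Claim_ definition above) =====
theorem make_shuffle_pcores_py_spec : Claim_equal_make_shuffle_pcores_py := by
  intro n grid _
  unfold Spec_make_shuffle_pcores_py make_shuffle_pcores_py make_shuffle_pcores_py_alt
  rw [PySem.List.foldl_append_eq_flatMap]
  simp only [List.nil_append]
  congr 1
  funext j
  exact chip_eq n grid.1 j
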